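-- pv_equiv track=rewrite | github.com/amichne/kast | .github/extensions/architecture-layers/check-architecture-layers.py | extract_call_argument
-- ===== SOURCE A (Python) =====
-- def extract_call_argument(text: str, open_paren_offset: int) -> str | None:
--     depth = 0
--     quote: str | None = None
--     escaped = False
--     for index in range(open_paren_offset, len(text)):
--         char = text[index]
--         if quote:
--             if escaped:
--                 escaped = False
--             elif char == "\\":
--                 escaped = True
--             elif char == quote:
--                 quote = None
--             continue
--         if char in ("'", '"'):
--             quote = char
--             continue
--         if char == "(":
--             depth += 1
--         elif char == ")":
--             depth -= 1
--             if depth == 0: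
--                 return text[open_paren_offset + 1 : index]
--     return None
-- ===== SOURCE B (Python) =====
-- def extract_call_argument(text: str, open_paren_offset: int) -> str | None:
--     # Pass 1: collect (index, char) pairs that lie outside string literals.
--     # A quote closes the literal iff the run of backslashes immediately before
--     # it has even length (backslash-run parity replaces an escaped flag).
--     code = []
--     quote = None
--     run = 0
--     for idx in range(open_paren_offset, len(text)):
--         ch = text[idx]
--         if quote is None:
--             code.append((idx, ch))
--             if ch in "'\"":
--                 quote = ch
--         elif ch == quote and run % 2 == 0:
--             quote = None
--         run = run + 1 if ch == "\\" else 0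
--     # Pass 2: plain parenthesis matching over the code characters only.
--     depth = 0
--     for idx, ch in code:
--         if ch == "(":
--             depth += 1
--         elif ch == ")":
--             depth -= 1
--             if depth == 0:
--                 return text[open_paren_offset + 1 : idx]
--     return None
-- ===== Notes on version B (the rewrite author's own statement) =====
-- stated objective: alternative
-- what changed: Replaces A's single fused state machine (depth + quote + escaped flags) with two staged passes: pass 1 extracts the (index, char) pairs outside string literals, deciding quote closure by the parity of the immediately preceding backslash run instead of an escaped flag; pass 2 is plain parenthesis matching over that list.
-- outside the precondition, e.g. on extract_call_argument('()', -5): A raises IndexError, B raises IndexError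
import Mathlib
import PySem

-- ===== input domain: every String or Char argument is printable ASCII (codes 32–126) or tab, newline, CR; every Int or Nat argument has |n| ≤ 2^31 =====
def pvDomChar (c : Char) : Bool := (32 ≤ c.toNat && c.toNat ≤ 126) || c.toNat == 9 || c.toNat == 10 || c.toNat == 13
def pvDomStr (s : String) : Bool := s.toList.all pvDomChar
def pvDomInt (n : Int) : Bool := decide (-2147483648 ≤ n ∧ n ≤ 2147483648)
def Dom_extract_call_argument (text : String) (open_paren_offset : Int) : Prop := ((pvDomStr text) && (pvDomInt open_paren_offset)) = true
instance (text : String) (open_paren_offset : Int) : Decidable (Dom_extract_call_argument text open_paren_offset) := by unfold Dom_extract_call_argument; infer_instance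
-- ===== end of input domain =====

-- B replaces A's single fused state machine (depth + quote + escaped flags) by two staged
-- passes: pass 1 collects the (index, char) pairs outside string literals, deciding quote
-- closure by backslash-run parity; pass 2 does plain paren matching over that list.

-- ===== PORT A =====
-- A's for-loop over range(open_paren_offset, len(text)) with state (depth, quote, escaped);
-- pyGet? = none (Python IndexError, only when open_paren_offset < -len) yields none, excluded by Pre_.
def pvALoop (cs : List Char) (start : Int) (idxs : List Int) (depth : Int) (quote : Option Char) (escaped : Bool) : Option String :=
  match idxs with
  | [] => none
  | i :: rest =>
    match PySem.List.pyGet? cs i with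
    | none => none
    | some c =>
      match quote with
      | some q =>
        if escaped then pvALoop cs start rest depth (some q) false
        else if c = '\\' then pvALoop cs start rest depth (some q) true
        else if c = q then pvALoop cs start rest depth none false
        else pvALoop cs start rest depth (some q) false
      | none =>
        if c = '\'' ∨ c = '"' then pvALoop cs start rest depth (some c) false
        else if c = '(' then pvALoop cs start rest (depth + 1) none false
        else if c = ')' then
          if depth - 1 = 0 then some (String.ofList (PySem.List.slice cs (some (start + 1)) (some i)))
          else pvALoop cs start rest (depth - 1) none false
        else pvALoop cs start rest depth none false

def extract_call_argument (text : String) (open_paren_offset : Int) : Option String :=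
  pvALoop text.toList open_paren_offset
    (PySem.List.pyRange open_paren_offset (text.toList.length : Int)) 0 none false

-- ===== PORT B =====
-- B's pass 1: the (index, char) pairs whose position is outside a string literal;
-- quote closure decided by parity of the backslash run immediately before the quote.
-- pyGet? = none (IndexError) propagates as none, as in port A.
-- quote-state update: a quote closes iff the preceding backslash run has even length
def pvQuoteStep (quote : Option Char) (ch : Char) (run : Nat) : Option Char :=
  match quote with
  | none => if ch = '\'' ∨ ch = '"' then some ch else none
  | some q => if ch = q ∧ run % 2 = 0 then none else some q

-- backslash-run update
def pvRunStep (ch : Char) (run : Nat) : Nat := if ch = '\\' then run + 1 else 0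

def pvPass1 (cs : List Char) (idxs : List Int) (quote : Option Char) (run : Nat) : Option (List (Int × Char)) :=
  match idxs with
  | [] => some []
  | i :: rest =>
    match PySem.List.pyGet? cs i with
    | none => none
    | some ch =>
      match pvPass1 cs rest (pvQuoteStep quote ch run) (pvRunStep ch run) with
      | none => none
      | some tail => some (if quote = none then (i, ch) :: tail else tail)

-- B's pass 2: plain parenthesis matching over the code characters only
def pvPass2 (cs : List Char) (start : Int) (depth : Int) (code : List (Int × Char)) : Option String :=
  match code with
  | [] => none
  | (i, ch) :: rest =>
    if ch = '(' then pvPass2 cs start (depth + 1) rest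
    else if ch = ')' then
      if depth - 1 = 0 then some (String.ofList (PySem.List.slice cs (some (start + 1)) (some i)))
      else pvPass2 cs start (depth - 1) rest
    else pvPass2 cs start depth rest

def extract_call_argument_alt (text : String) (open_paren_offset : Int) : Option String :=
  match pvPass1 text.toList
      (PySem.List.pyRange open_paren_offset (text.toList.length : Int)) none 0 with
  | none => none
  | some code => pvPass2 text.toList open_paren_offset 0 code

-- ===== PRECONDITION & SPEC =====
-- Pre_ excludes exactly open_paren_offset < -len(text), where Python A raises IndexError
-- on its first character access (and Python B raises the same way).
def Pre_extract_call_argument (text : String) (open_paren_offset : Int) : Prop :=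
  -(PySem.Str.len text) ≤ open_paren_offset
instance (text : String) (open_paren_offset : Int) : Decidable (Pre_extract_call_argument text open_paren_offset) := by unfold Pre_extract_call_argument; infer_instance

def pvWitness_extract_call_argument : String × Int := ("f('(\\')', x)", 1)

def Spec_extract_call_argument (text : String) (open_paren_offset : Int) (out : Option String) : Prop := out = extract_call_argument_alt text open_paren_offset
instance (text : String) (open_paren_offset : Int) (out : Option String) : Decidable (Spec_extract_call_argument text open_paren_offset out) := by unfold Spec_extract_call_argument; infer_instance

-- ===== CLAIM (what is proved, stated in full; the proofs are below) =====
def Claim_equal_extract_call_argument : Prop := ∀ (text : String) (open_paren_offset : Int), Dom_extract_call_argument text open_paren_offset → Pre_extract_call_argument text open_paren_offset → Spec_extract_call_argument text open_paren_offset (extract_call_argument text open_paren_offset)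

-- ===== LEMMAS AND PROOFS =====

-- pushing the cons/skip step of pass 1 through Option.elim
theorem pvSkipIf (q : Char) (i : Int) (ch : Char) (tail : List (Int × Char)) :
    (if (some q : Option Char) = none then (i, ch) :: tail else tail) = tail := by simp

theorem pvElimId (o : Option (List (Int × Char))) (f : List (Int × Char) → Option String) :
    (match o with | none => none | some t => some t).elim none f = o.elim none f := by
  cases o <;> rfl

theorem pvElimMap (o : Option (List (Int × Char))) (g : List (Int × Char) → List (Int × Char))
    (f : List (Int × Char) → Option String) :
    (match o with | none => none | some t => some (g t)).elim none f
      = o.elim none (fun t => f (g t)) := by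
  cases o <;> rfl

-- pass 1 never hits an IndexError when every index is in range
theorem pvPass1_isSome (cs : List Char) :
    ∀ (idxs : List Int) (quote : Option Char) (run : Nat),
      (∀ i ∈ idxs, PySem.Raise.InRange cs.length i) →
      (pvPass1 cs idxs quote run).isSome := by
  intro idxs
  induction idxs with
  | nil => intro quote run _; simp [pvPass1]
  | cons i rest ih =>
    intro quote run h
    rw [pvPass1]
    have hi : PySem.Raise.InRange cs.length i := h i (by simp)
    cases hc : PySem.List.pyGet? cs i with
    | none =>
      exfalso
      rw [PySem.List.pyGet?_eq_none_iff] at hc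
      exact hc hi
    | some ch =>
      have hrec := ih (pvQuoteStep quote ch run) (pvRunStep ch run) (fun j hj => h j (by simp [hj]))
      cases h2 : pvPass1 cs rest (pvQuoteStep quote ch run) (pvRunStep ch run) with
      | none => rw [h2] at hrec; simp at hrec
      | some tail => simp [h2]

-- the heart: A's fused state machine = B's pass 1 followed by pass 2, by induction on
-- the index list; A's escaped flag corresponds to odd parity of B's backslash run.
theorem pvAgree (cs : List Char) (start : Int) :
    ∀ (idxs : List Int), (∀ i ∈ idxs, PySem.Raise.InRange cs.length i) →
      ∀ (depth : Int) (run : Nat),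
        (pvALoop cs start idxs depth none false
           = (pvPass1 cs idxs none run).elim none (pvPass2 cs start depth))
        ∧ (∀ q : Char, q ≠ '\\' →
           pvALoop cs start idxs depth (some q) (decide (run % 2 = 1))
             = (pvPass1 cs idxs (some q) run).elim none (pvPass2 cs start depth)) := by
  intro idxs
  induction idxs with
  | nil =>
    intro _ depth run
    constructor
    · simp [pvALoop, pvPass1, pvPass2]
    · intro q _; simp [pvALoop, pvPass1, pvPass2]
  | cons i rest ih =>
    intro h depth run
    have hi : PySem.Raise.InRange cs.length i := h i (by simp)
    have hrest : ∀ j ∈ rest, PySem.Raise.InRange cs.length j := fun j hj => h j (by simp [hj])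
    cases hc : PySem.List.pyGet? cs i with
    | none =>
      exfalso
      rw [PySem.List.pyGet?_eq_none_iff] at hc
      exact hc hi
    | some ch =>
      constructor
      · -- no quote open at entry: position i is code
        rw [pvALoop, pvPass1]
        simp only [hc, reduceIte]
        rw [pvElimMap]
        by_cases hq : ch = '\'' ∨ ch = '"'
        · -- a quote opens; ch is neither backslash nor a paren
          have hnb : ch ≠ '\\' := by rcases hq with h' | h' <;> subst h' <;> decide
          have hnp1 : ch ≠ '(' := by rcases hq with h' | h' <;> subst h' <;> decide
          have hnp2 : ch ≠ ')' := by rcases hq with h' | h' <;> subst h' <;> decide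
          rw [if_pos hq,
            show pvQuoteStep none ch run = some ch from by rw [pvQuoteStep]; rw [if_pos hq],
            show pvRunStep ch run = 0 from by rw [pvRunStep, if_neg hnb]]
          have hstep : (fun t => pvPass2 cs start depth ((i, ch) :: t))
              = pvPass2 cs start depth := by
            funext t; rw [pvPass2]; simp [hnp1, hnp2]
          rw [hstep]
          have := (ih hrest depth 0).2 ch hnb
          rw [show (decide ((0 : Nat) % 2 = 1)) = false from by decide] at this
          exact this
        · rw [if_neg hq,
            show pvQuoteStep none ch run = none from by rw [pvQuoteStep]; rw [if_neg hq]]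
          by_cases hop : ch = '('
          · rw [if_pos hop,
              show pvRunStep ch run = 0 from by rw [pvRunStep, if_neg (by subst hop; decide)]]
            have hstep : (fun t => pvPass2 cs start depth ((i, ch) :: t))
                = pvPass2 cs start (depth + 1) := by
              funext t; rw [pvPass2]; simp [hop]
            rw [hstep]
            exact (ih hrest (depth + 1) 0).1
          · rw [if_neg hop]
            by_cases hcl : ch = ')'
            · rw [if_pos hcl,
                show pvRunStep ch run = 0 from by rw [pvRunStep, if_neg (by subst hcl; decide)]]
              by_cases hd : depth - 1 = 0
              · rw [if_pos hd]
                have hstep : (fun t => pvPass2 cs start depth ((i, ch) :: t))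
                    = fun _ => some (String.ofList (PySem.List.slice cs (some (start + 1)) (some i))) := by
                  funext t; rw [pvPass2]; simp [hcl, hd]
                rw [hstep]
                have hsome := pvPass1_isSome cs rest none 0 hrest
                cases hrec : pvPass1 cs rest none 0 with
                | none => rw [hrec] at hsome; simp at hsome
                | some tail => rfl
              · rw [if_neg hd]
                have hstep : (fun t => pvPass2 cs start depth ((i, ch) :: t))
                    = pvPass2 cs start (depth - 1) := by
                  funext t; rw [pvPass2]; simp [hcl, hd]
                rw [hstep]
                exact (ih hrest (depth - 1) 0).1
            · -- ordinary character (including a backslash outside any string)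
              rw [if_neg hcl]
              have hstep : (fun t => pvPass2 cs start depth ((i, ch) :: t))
                  = pvPass2 cs start depth := by
                funext t; rw [pvPass2]; simp [hop, hcl]
              rw [hstep]
              exact (ih hrest depth (pvRunStep ch run)).1
      · -- quote q open at entry: position i is inside a string literal
        intro q hqnb
        rw [pvALoop, pvPass1]
        simp only [hc, pvSkipIf]
        rw [pvElimId]
        by_cases hesc : run % 2 = 1
        · -- escaped: the char is consumed, the string stays open
          rw [show (decide (run % 2 = 1)) = true from by simp [hesc], if_pos rfl,
            show pvQuoteStep (some q) ch run = some q from by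
              rw [pvQuoteStep]; rw [if_neg (by omega)]]
          have := (ih hrest depth (pvRunStep ch run)).2 q hqnb
          rw [show (decide ((pvRunStep ch run) % 2 = 1)) = false from by
            rw [pvRunStep]; by_cases hb : ch = '\\' <;> simp [hb] <;> omega] at this
          exact this
        · have hrun0 : run % 2 = 0 := by omega
          rw [show (decide (run % 2 = 1)) = false from by simp [hesc]]
          rw [if_neg (by simp)]
          by_cases hb : ch = '\\'
          · -- unescaped backslash: A sets escaped, B's run parity turns odd
            rw [if_pos hb,
              show pvQuoteStep (some q) ch run = some q from by
                rw [pvQuoteStep]; rw [if_neg (by rintro ⟨h', _⟩; exact hqnb (h' ▸ hb ▸ rfl))],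
              show pvRunStep ch run = run + 1 from by rw [pvRunStep, if_pos hb]]
            have := (ih hrest depth (run + 1)).2 q hqnb
            rw [show (decide ((run + 1) % 2 = 1)) = true from by simp; omega] at this
            exact this
          · rw [if_neg hb]
            by_cases hqq : ch = q
            · -- unescaped closing quote
              rw [if_pos hqq,
                show pvQuoteStep (some q) ch run = none from by
                  rw [pvQuoteStep]; rw [if_pos ⟨hqq, hrun0⟩],
                show pvRunStep ch run = 0 from by rw [pvRunStep, if_neg hb]]
              exact (ih hrest depth 0).1
            · -- ordinary character inside the string
              rw [if_neg hqq,
                show pvQuoteStep (some q) ch run = some q from by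
                  rw [pvQuoteStep]; rw [if_neg (by rintro ⟨h', _⟩; exact hqq h')],
                show pvRunStep ch run = 0 from by rw [pvRunStep, if_neg hb]]
              have := (ih hrest depth 0).2 q hqnb
              rw [show (decide ((0 : Nat) % 2 = 1)) = false from by decide] at this
              exact this

-- ===== VERDICT (by name: the statement is the Claim_ definition above) =====
theorem extract_call_argument_spec : Claim_equal_extract_call_argument := by
  intro text off _ hpre
  unfold Spec_extract_call_argument extract_call_argument extract_call_argument_alt
  have hin : ∀ i ∈ PySem.List.pyRange off (text.toList.length : Int),
      PySem.Raise.InRange text.toList.length i := by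
    intro i hi
    rw [PySem.List.mem_pyRange_one] at hi
    unfold Pre_extract_call_argument PySem.Str.len at hpre
    exact ⟨by omega, by omega⟩
  have := (pvAgree text.toList off _ hin 0 0).1
  rw [this]
  cases pvPass1 text.toList (PySem.List.pyRange off (text.toList.length : Int)) none 0
  · rfl
  · rfl
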